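-- pv_equiv track=rewrite | github.com/Joao-UTFPR/comunicacao-de-dados-python | codigo_de_linha.py | pst
-- ===== SOURCE A (Python) =====
-- def pst(data):
--     data_pst = []
--     temp = True
--     for i in range(len(data)):
--         if data[i] == 0 and temp == True:
--             x = 1
--             temp = False
--         elif data[i] == 0 and temp == False:
--             x = -1
--             temp = True
--         else:
--             x = 0
--         data_pst.append(x)
--
--     data_pst.append(0)
--     return data_pst
-- ===== SOURCE B (Python) =====
-- def pst(data):
--     zero_positions = [i for i, v in enumerate(data) if v == 0]
--     out = [0] * (len(data) + 1)
--     for k, i in enumerate(zero_positions):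
--         out[i] = 1 if k % 2 == 0 else -1
--     return out
-- ===== Notes on version B (the rewrite author's own statement) =====
-- stated objective: alternative
-- what changed: Instead of threading a toggle boolean through an index loop that appends element by element, B pre-sizes a zero buffer of length len(data)+1, collects the zero positions once, and scatters alternating +1/-1 signs (by the parity of the zero's rank) into that buffer.
import Mathlib
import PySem

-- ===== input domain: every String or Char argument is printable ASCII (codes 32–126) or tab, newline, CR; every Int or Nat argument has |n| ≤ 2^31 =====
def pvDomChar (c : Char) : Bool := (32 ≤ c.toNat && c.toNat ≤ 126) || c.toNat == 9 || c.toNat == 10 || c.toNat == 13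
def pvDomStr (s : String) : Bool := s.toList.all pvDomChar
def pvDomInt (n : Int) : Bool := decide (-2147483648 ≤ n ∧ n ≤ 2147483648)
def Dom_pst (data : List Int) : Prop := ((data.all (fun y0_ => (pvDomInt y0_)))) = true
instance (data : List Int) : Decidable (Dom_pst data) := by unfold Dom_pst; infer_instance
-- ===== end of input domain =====

-- B replaces A's toggle-threading append loop by a pre-sized zero buffer into which
-- alternating +1/-1 signs are scattered at the zero positions (alternative decomposition).


-- ===== PORT A =====
-- for i in range(len(data)): … data[i] …  is the fold of the loop body over the list's
-- elements in order; state = (data_pst, temp), branches in A's order.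
def pstStep (st : List Int × Bool) (d : Int) : List Int × Bool :=
  if d == 0 && st.2 == true then (st.1 ++ [(1 : Int)], false)
  else if d == 0 && st.2 == false then (st.1 ++ [(-1 : Int)], true)
  else (st.1 ++ [(0 : Int)], st.2)

def pst (data : List Int) : List Int :=
  let st := data.foldl pstStep ([], true)
  st.1 ++ [0]

-- ===== PORT B =====
-- out[i] = v : indices produced by enumerate are nonnegative and < out.length,
-- so List.set with .toNat is exact here.
def pst_alt (data : List Int) : List Int :=
  let zeroPositions : List Int :=
    ((PySem.List.enumerate data).filter (fun p => p.2 == 0)).map (·.1)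
  let out : List Int := List.replicate (data.length + 1) 0
  (PySem.List.enumerate zeroPositions).foldl
    (fun o ki => o.set ki.2.toNat (if ki.1 % 2 == 0 then (1 : Int) else -1)) out

-- ===== PRECONDITION & SPEC =====
def Spec_pst (data : List Int) (out : List Int) : Prop := out = pst_alt data
instance (data : List Int) (out : List Int) : Decidable (Spec_pst data out) := by unfold Spec_pst; infer_instance

-- ===== CLAIM (what is proved, stated in full; the proofs are below) =====
def Claim_equal_pst : Prop := ∀ (data : List Int), Dom_pst data → Spec_pst data (pst data)

-- ===== LEMMAS AND PROOFS =====

-- reference: the encoded stream (without the trailing 0), toggle t explicit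
def pvSpec : List Int → Bool → List Int
  | [], _ => []
  | d :: ds, t => if d = 0 then (if t then 1 else -1) :: pvSpec ds (!t) else 0 :: pvSpec ds t

-- zero positions with offset s
def pvZ : List Int → Int → List Int
  | [], _ => []
  | d :: ds, s => if d = 0 then s :: pvZ ds (s + 1) else pvZ ds (s + 1)

lemma pvZ_eq (data : List Int) (s : Int) :
    ((PySem.List.enumerate data s).filter (fun p => p.2 == 0)).map (·.1) = pvZ data s := by
  induction data generalizing s with
  | nil => simp [pvZ, PySem.List.enumerate_nil]
  | cons d ds ih =>
    by_cases h : d = 0 <;>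
      simp [pvZ, PySem.List.enumerate_cons, h, ih]

lemma pvZ_shift (data : List Int) (s : Int) :
    pvZ data (s + 1) = (pvZ data s).map (· + 1) := by
  induction data generalizing s with
  | nil => simp [pvZ]
  | cons d ds ih => by_cases h : d = 0 <;> simp [pvZ, h, ih]

lemma pvZ_nonneg (data : List Int) (s : Int) (hs : 0 ≤ s) :
    ∀ i ∈ pvZ data s, 0 ≤ i := by
  induction data generalizing s with
  | nil => simp [pvZ]
  | cons d ds ih =>
    intro i hi
    by_cases h : d = 0 <;> simp [pvZ, h] at hi
    · rcases hi with rfl | hi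
      · exact hs
      · exact ih (s + 1) (by omega) i hi
    · exact ih (s + 1) (by omega) i hi

lemma enumerate_map (f : Int → Int) (xs : List Int) (s : Int) :
    PySem.List.enumerate (xs.map f) s
      = (PySem.List.enumerate xs s).map (fun p => (p.1, f p.2)) := by
  induction xs generalizing s with
  | nil => simp [PySem.List.enumerate_nil]
  | cons x xs ih => simp [PySem.List.enumerate_cons, ih]

-- scattering into x :: out at indices shifted by one leaves x alone
lemma scatter_shift (ps : List (Int × Int)) (x : Int) (out : List Int)
    (hps : ∀ p ∈ ps, 0 ≤ p.2) :
    ps.foldl (fun o (ki : Int × Int) =>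
        o.set (ki.2 + 1).toNat (if ki.1 % 2 == 0 then (1 : Int) else -1)) (x :: out)
      = x :: ps.foldl (fun o ki =>
        o.set ki.2.toNat (if ki.1 % 2 == 0 then (1 : Int) else -1)) out := by
  induction ps generalizing out with
  | nil => simp
  | cons p ps ih =>
    have hp : 0 ≤ p.2 := hps p (by simp)
    have h1 : (p.2 + 1).toNat = p.2.toNat + 1 := by omega
    simp only [List.foldl_cons, h1, List.set_cons_succ]
    exact ih _ (fun q hq => hps q (by simp [hq]))

lemma parity_succ (p : Int) : ((p + 1) % 2 == 0) = !(p % 2 == 0) := by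
  rcases Int.emod_two_eq p with h | h <;>
    simp [h, Int.add_emod]

-- the scatter over the zero positions builds pvSpec with toggle = (p % 2 == 0)
lemma scatter_eq (data : List Int) (p : Int) (hp : 0 ≤ p) :
    (PySem.List.enumerate (pvZ data 0) p).foldl
        (fun o ki => o.set ki.2.toNat (if ki.1 % 2 == 0 then (1 : Int) else -1))
        (List.replicate (data.length + 1) 0)
      = pvSpec data (p % 2 == 0) ++ [0] := by
  induction data generalizing p with
  | nil => simp [pvZ, pvSpec, PySem.List.enumerate_nil]
  | cons d ds ih =>
    have hz : ∀ q ∈ PySem.List.enumerate (pvZ ds 0) (p + 1), 0 ≤ q.2 := by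
      intro q hq
      rw [PySem.List.mem_enumerate_iff] at hq
      rcases hq with ⟨k, hk, rfl⟩
      exact pvZ_nonneg ds 0 le_rfl _ (List.getElem_mem hk)
    have hz' : ∀ q ∈ PySem.List.enumerate (pvZ ds 0) p, 0 ≤ q.2 := by
      intro q hq
      rw [PySem.List.mem_enumerate_iff] at hq
      rcases hq with ⟨k, hk, rfl⟩
      exact pvZ_nonneg ds 0 le_rfl _ (List.getElem_mem hk)
    by_cases h : d = 0
    · -- zero bit: set position 0 to the sign of p, then shifted scatter on the tail
      have hs : pvZ ds 1 = (pvZ ds 0).map (· + 1) := by simpa using pvZ_shift ds 0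
      have : pvZ (d :: ds) 0 = 0 :: (pvZ ds 0).map (· + 1) := by
        simp [pvZ, h, hs]
      rw [this]
      simp only [PySem.List.enumerate_cons, List.foldl_cons, enumerate_map]
      have hrep : List.replicate ((d :: ds).length + 1) (0 : Int)
          = 0 :: List.replicate (ds.length + 1) 0 := by
        simp [List.replicate_succ]
      rw [hrep]
      simp only [List.set_cons_zero, Int.toNat_zero]
      rw [List.foldl_map]
      have := scatter_shift ((PySem.List.enumerate (pvZ ds 0) (p + 1)))
        (if p % 2 == 0 then (1 : Int) else -1) (List.replicate (ds.length + 1) 0) hz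
      simp only at this ⊢
      rw [this, ih (p + 1) (by omega)]
      simp [pvSpec, h, parity_succ]
    · have hs : pvZ ds 1 = (pvZ ds 0).map (· + 1) := by simpa using pvZ_shift ds 0
      have : pvZ (d :: ds) 0 = (pvZ ds 0).map (· + 1) := by
        simp [pvZ, h, hs]
      rw [this, enumerate_map]
      have hrep : List.replicate ((d :: ds).length + 1) (0 : Int)
          = 0 :: List.replicate (ds.length + 1) 0 := by
        simp [List.replicate_succ]
      rw [hrep, List.foldl_map]
      have := scatter_shift ((PySem.List.enumerate (pvZ ds 0) p)) 0
        (List.replicate (ds.length + 1) 0) hz'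
      simp only at this ⊢
      rw [this, ih p hp]
      simp [pvSpec, h]

-- A's fold builds pvSpec onto the accumulator
lemma foldA_eq (data : List Int) (acc : List Int) (t : Bool) :
    (data.foldl pstStep (acc, t)).1 = acc ++ pvSpec data t := by
  induction data generalizing acc t with
  | nil => simp [pvSpec]
  | cons d ds ih =>
    rw [List.foldl_cons]
    by_cases h : d = 0 <;> cases t <;>
      simp [pstStep, pvSpec, h, ih, List.append_assoc]

lemma pst_eq (data : List Int) : pst data = pvSpec data true ++ [0] := by
  unfold pst
  simp only [foldA_eq data [] true, List.nil_append]

lemma pst_alt_eq (data : List Int) : pst_alt data = pvSpec data true ++ [0] := by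
  unfold pst_alt
  simp only [pvZ_eq data 0]
  have := scatter_eq data 0 le_rfl
  simpa using this

-- ===== VERDICT (by name: the statement is the Claim_ definition above) =====
theorem pst_spec : Claim_equal_pst := by
  intro data _
  unfold Spec_pst
  rw [pst_eq, pst_alt_eq]
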